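-- pv_equiv track=rewrite | github.com/soda723/codingtest | Ji/91_신입사원.py | solution
-- ===== SOURCE A (Python) =====
-- def solution(N, itv):
--     answer = 1 # 첫번째 값 포함
--     mm = itv[0]
--     for idx in range(1,N): # 첫번재 값은 할필요 없음
--         s = itv[idx]
--         ## answer = N으로 시작했을때
--         # if s == 1 : mm = s
--         # elif s == N : answer -= 1
--         # elif s > mm : answer -= 1
--         # else : mm = s
--         if s < mm :
--             answer += 1
--             mm = s
--
--     return answer
-- ===== SOURCE B (Python) =====
-- def solution(N, itv):
--     # pass 1: build the prefix-minimum table over itv[:N] (itv[0] still raises on empty input)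
--     mins = [itv[0]]
--     for s in itv[1:N]:
--         last = mins[-1]
--         mins.append(s if s < last else last)
--     # pass 2: count strict decreases between adjacent table entries, plus the first element
--     return 1 + sum(1 for a, b in zip(mins, mins[1:]) if b < a)
-- ===== Notes on version B (the rewrite author's own statement) =====
-- stated objective: alternative
-- what changed: A's single fused loop that maintains the running minimum and counts in one pass is replaced by two separate passes: first build the prefix-minimum table of itv[:N], then count strict decreases between adjacent table entries.
-- outside the precondition, e.g. on solution(-1, [3, 1, 2]): A returns 1, B returns 2
import Mathlib
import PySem

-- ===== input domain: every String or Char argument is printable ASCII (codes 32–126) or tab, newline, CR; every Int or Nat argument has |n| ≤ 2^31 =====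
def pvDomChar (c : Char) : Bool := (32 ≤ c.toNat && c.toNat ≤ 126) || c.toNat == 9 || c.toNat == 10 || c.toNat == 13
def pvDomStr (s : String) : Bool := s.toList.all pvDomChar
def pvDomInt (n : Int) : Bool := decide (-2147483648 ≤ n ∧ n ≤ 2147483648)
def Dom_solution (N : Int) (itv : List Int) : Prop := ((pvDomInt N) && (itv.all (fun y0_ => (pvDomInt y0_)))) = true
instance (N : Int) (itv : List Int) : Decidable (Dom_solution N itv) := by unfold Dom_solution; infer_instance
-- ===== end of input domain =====

-- B changes the decomposition only (two passes: prefix-min table, then adjacent-pair count); same O(N) cost.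

-- ===== PORT A =====
def solution (N : Int) (itv : List Int) : Int :=
  let mm := PySem.List.pyGetD itv 0 0
  ((PySem.List.pyRange 1 N 1).foldl
    (fun (p : Int × Int) idx =>
      if PySem.List.pyGetD itv idx 0 < p.2 then (p.1 + 1, PySem.List.pyGetD itv idx 0) else p)
    (1, mm)).1

-- ===== PORT B =====
def solution_alt (N : Int) (itv : List Int) : Int :=
  let mins := (PySem.List.slice itv (some 1) (some N)).foldl
    (fun acc s =>
      acc ++ [if s < PySem.List.pyGetD acc (-1) 0 then s else PySem.List.pyGetD acc (-1) 0])
    [PySem.List.pyGetD itv 0 0]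
  1 + (((mins.zip (PySem.List.slice mins (some 1) none)).filter (fun p => p.2 < p.1)).length : Int)

-- ===== PRECONDITION & SPEC =====
-- Pre_ excludes: empty itv and N > len(itv), where A raises IndexError; and negative N (outside the
-- natural domain of an employee count), on which A returns 1 but B's Python slice itv[1:N] wraps.
def Pre_solution (N : Int) (itv : List Int) : Prop := itv ≠ [] ∧ 0 ≤ N ∧ N ≤ (itv.length : Int)
instance (N : Int) (itv : List Int) : Decidable (Pre_solution N itv) := by unfold Pre_solution; infer_instance
def pvWitness_solution : Int × List Int := (3, [4, 2, 3])

def Spec_solution (N : Int) (itv : List Int) (out : Int) : Prop := out = solution_alt N itv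
instance (N : Int) (itv : List Int) (out : Int) : Decidable (Spec_solution N itv out) := by unfold Spec_solution; infer_instance

-- ===== CLAIM (what is proved, stated in full; the proofs are below) =====
def Claim_equal_solution : Prop := ∀ (N : Int) (itv : List Int), Dom_solution N itv → Pre_solution N itv → Spec_solution N itv (solution N itv)

-- ===== LEMMAS AND PROOFS =====

-- running-min-and-count state of A's loop, expressed over the list of scanned elements
def dcount (m : Int) : List Int → Int
  | [] => 0
  | s :: t => if s < m then 1 + dcount s t else dcount m t

def rmin (m : Int) : List Int → Int
  | [] => m
  | s :: t => if s < m then rmin s t else rmin m t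

-- the prefix-minimum table B builds
def pmins (m : Int) : List Int → List Int
  | [] => [m]
  | s :: t => m :: pmins (if s < m then s else m) t

theorem a_fold_eq (l : List Int) : ∀ (a m : Int),
    l.foldl (fun (p : Int × Int) s => if s < p.2 then (p.1 + 1, s) else p) (a, m)
      = (a + dcount m l, rmin m l) := by
  induction l with
  | nil => intro a m; simp [dcount, rmin]
  | cons s t ih =>
    intro a m
    simp only [List.foldl_cons, dcount, rmin]
    by_cases h : s < m
    · simp [h, ih]; ring
    · simp [h, ih]

theorem b_fold_eq (l : List Int) : ∀ (pre : List Int) (m : Int),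
    l.foldl (fun acc s =>
        acc ++ [if s < PySem.List.pyGetD acc (-1) 0 then s else PySem.List.pyGetD acc (-1) 0]) (pre ++ [m])
      = pre ++ pmins m l := by
  induction l with
  | nil => intro pre m; simp [pmins]
  | cons s t ih =>
    intro pre m
    simp only [List.foldl_cons]
    have hlast : PySem.List.pyGetD (pre ++ [m]) (-1) 0 = m :=
      PySem.List.pyGetD_neg_one_append_singleton pre m 0
    simp only [hlast]
    have h2 := ih (pre ++ [m]) (if s < m then s else m)
    rw [show pre ++ [m] ++ [if s < m then s else m]
          = (pre ++ [m]) ++ [if s < m then s else m] from rfl] at h2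
    rw [h2, List.append_assoc]
    simp [pmins]

theorem pmins_count_eq (l : List Int) : ∀ (m : Int),
    ((((pmins m l).zip (pmins m l).tail).filter (fun p => p.2 < p.1)).length : Int)
      = dcount m l := by
  induction l with
  | nil => intro m; simp [pmins, dcount]
  | cons s t ih =>
    intro m
    have hhead : ∀ m', pmins m' t = m' :: (pmins m' t).tail := by
      intro m'; cases t <;> simp [pmins]
    simp only [pmins, dcount]
    by_cases h : s < m
    · rw [if_pos h, if_pos h]
      conv_lhs => rw [hhead s]
      simp only [List.zip_cons_cons, List.tail_cons, List.filter_cons]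
      rw [← hhead s]
      have : (decide (s < m)) = true := by simp [h]
      simp only [this]
      simp [← ih s]
      ring
    · rw [if_neg h, if_neg h]
      conv_lhs => rw [hhead m]
      simp only [List.zip_cons_cons, List.tail_cons, List.filter_cons]
      rw [← hhead m]
      have : (decide (m < m)) = false := by simp
      simp only [this]
      simp [← ih m]

-- ===== VERDICT (by name: the statement is the Claim_ definition above) =====
theorem solution_spec : Claim_equal_solution := by
  intro N itv _ hpre
  obtain ⟨hne, hN0, hNle⟩ := hpre
  unfold Spec_solution solution solution_alt
  obtain ⟨x, rest, rfl⟩ : ∃ a r, itv = a :: r := by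
    cases itv with
    | nil => exact absurd rfl hne
    | cons a r => exact ⟨a, r, rfl⟩
  simp only [PySem.List.pyGetD_zero_cons]
  set l := PySem.List.slice (x :: rest) (some 1) (some N) with hl
  -- B side: the fold builds the prefix-minimum table
  have hB : (l.foldl (fun acc s =>
      acc ++ [if s < PySem.List.pyGetD acc (-1) 0 then s else PySem.List.pyGetD acc (-1) 0]) [x])
      = pmins x l := by
    have h := b_fold_eq l [] x
    simpa using h
  rw [hB, PySem.List.slice_from_one, pmins_count_eq l x]
  -- A side: the indexed loop is the same fold over the slice
  have hTnat : ((x :: rest).take N.toNat).length = N.toNat := by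
    simp only [List.length_cons] at hNle
    simp only [List.length_take, List.length_cons]
    omega
  have hTlen : ((((x :: rest).take N.toNat).length : Nat) : Int) = N := by
    rw [hTnat]; omega
  have hcong : (PySem.List.pyRange 1 N 1).foldl
      (fun (p : Int × Int) idx =>
        if PySem.List.pyGetD (x :: rest) idx 0 < p.2 then (p.1 + 1, PySem.List.pyGetD (x :: rest) idx 0) else p)
      (1, x)
    = (PySem.List.pyRange 1 N 1).foldl
      (fun (p : Int × Int) idx =>
        if PySem.List.pyGetD ((x :: rest).take N.toNat) idx 0 < p.2 then (p.1 + 1, PySem.List.pyGetD ((x :: rest).take N.toNat) idx 0) else p)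
      (1, x) := by
    apply PySem.List.foldl_congr_mem
    intro acc j hj
    have hj' := (PySem.List.mem_pyRange_one).mp hj
    have hjlen : j < ((x :: rest).length : Int) := lt_of_lt_of_le hj'.2 hNle
    have hjT : j < ((((x :: rest).take N.toNat).length : Nat) : Int) := by
      rw [hTnat]; omega
    rw [PySem.List.pyGetD_eq_getElem _ _ (by omega) hjlen,
      PySem.List.pyGetD_eq_getElem _ _ (by omega) hjT]
    simp [List.getElem_take]
  have hA := PySem.List.foldl_pyRange_pyGetD' ((x :: rest).take N.toNat) 0
      (fun (p : Int × Int) s => if s < p.2 then (p.1 + 1, s) else p) (1, x) (a := 1) (by norm_num)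
  rw [hTlen] at hA
  rw [hcong, hA]
  have hTd : ((x :: rest).take N.toNat).drop (1 : Int).toNat = l := by
    rw [hl, PySem.List.slice_toNat _ (by norm_num) hN0]
    simp [List.drop_take]
  rw [hTd, a_fold_eq l 1 x]
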